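-- pv_equiv track=rewrite | github.com/Schapagain/online_classes | ucsd_algo/maximum_prizes.py | findPrizeList
-- ===== SOURCE A (Python) =====
-- def findPrizeList(num_candies):
--
--     if num_candies < 3:
--         return [num_candies]
--
--     # Add first two prizes in the list
--     prizes = [1,2]
--     candies_remaining = num_candies - 3
--
--     # Add one more position if we have enough candies
--     # else add remaining candies to the prize for
--     # previous positioono
--     while candies_remaining > 0:
--         last_prize_added = prizes[-1]
--         if candies_remaining >= last_prize_added + 1:
--             prizes.append(last_prize_added+1)
--             candies_remaining -= last_prize_added+1
--         else:
--             prizes[-1] += candies_remaining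
--             candies_remaining = 0
--
--     return prizes
-- ===== SOURCE B (Python) =====
-- def findPrizeList(num_candies):
--     if num_candies < 3:
--         return [num_candies]
--     # binary search for the largest m with m*(m+1)//2 <= num_candies
--     lo, hi = 1, num_candies
--     while lo < hi:
--         mid = (lo + hi + 1) // 2
--         if mid * (mid + 1) // 2 <= num_candies:
--             lo = mid
--         else:
--             hi = mid - 1
--     prizes = list(range(1, lo + 1))
--     prizes[-1] += num_candies - lo * (lo + 1) // 2
--     return prizes
-- ===== Notes on version B (the rewrite author's own statement) =====
-- stated objective: alternative
-- what changed: Replaces the greedy one-prize-at-a-time accumulation loop with a binary search for the largest count m whose triangular number fits in num_candies, then builds the list range(one..m) and adds the leftover candies to the last prize.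
import Mathlib
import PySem

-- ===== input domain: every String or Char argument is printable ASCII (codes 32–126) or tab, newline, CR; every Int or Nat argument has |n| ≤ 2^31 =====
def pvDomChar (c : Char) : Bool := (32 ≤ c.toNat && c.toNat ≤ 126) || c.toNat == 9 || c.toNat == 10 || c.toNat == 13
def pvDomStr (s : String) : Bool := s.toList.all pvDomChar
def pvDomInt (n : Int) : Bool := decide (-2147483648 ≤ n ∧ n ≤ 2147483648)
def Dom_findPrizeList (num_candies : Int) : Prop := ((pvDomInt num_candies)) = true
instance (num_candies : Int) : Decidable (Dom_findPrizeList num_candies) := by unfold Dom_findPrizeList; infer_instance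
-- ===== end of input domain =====

-- B replaces A's O(√n)-step greedy accumulation by a binary search for the prize count
-- (largest m with m*(m+1)//2 ≤ num_candies) followed by building range(1, m+1) and adding
-- the leftover to the last prize; objective: alternative algorithm (same overall cost,
-- output length dominates).

-- ===== PORT A =====
-- the while loop, with fuel; fuel = num_candies.toNat always suffices (each iteration
-- either ends the loop or lowers candies_remaining by at least 3)
def pvLoopA (fuel : Nat) (prizes : List Int) (rem : Int) : List Int :=
  match fuel with
  | 0 => prizes
  | fuel + 1 =>
    if rem > 0 then
      -- prizes[-1]: the list is nonempty at every reachable call, default never used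
      let last := PySem.List.pyGetD prizes (-1) 0
      if rem ≥ last + 1 then
        pvLoopA fuel (prizes ++ [last + 1]) (rem - (last + 1))
      else
        pvLoopA fuel (prizes.dropLast ++ [last + rem]) 0
    else prizes

def findPrizeList (num_candies : Int) : List Int :=
  if num_candies < 3 then [num_candies]
  else pvLoopA num_candies.toNat [1, 2] (num_candies - 3)

-- ===== PORT B =====
-- binary search: largest lo with lo*(lo+1)//2 ≤ n; fuel = (hi-lo).toNat at the call
def pvBSearch (fuel : Nat) (lo hi n : Int) : Int :=
  match fuel with
  | 0 => lo
  | fuel + 1 =>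
    if lo < hi then
      let mid := PySem.Int.floordiv (lo + hi + 1) 2
      if PySem.Int.floordiv (mid * (mid + 1)) 2 ≤ n then
        pvBSearch fuel mid hi n
      else
        pvBSearch fuel lo (mid - 1) n
    else lo

def findPrizeList_alt (num_candies : Int) : List Int :=
  if num_candies < 3 then [num_candies]
  else
    let m := pvBSearch (num_candies - 1).toNat 1 num_candies num_candies
    let prizes := PySem.List.pyRange 1 (m + 1) 1
    prizes.dropLast ++ [PySem.List.pyGetD prizes (-1) 0 + (num_candies - PySem.Int.floordiv (m * (m + 1)) 2)]

-- ===== PRECONDITION & SPEC =====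
def Spec_findPrizeList (num_candies : Int) (out : List Int) : Prop := out = findPrizeList_alt num_candies
instance (num_candies : Int) (out : List Int) : Decidable (Spec_findPrizeList num_candies out) := by unfold Spec_findPrizeList; infer_instance

-- ===== CLAIM (what is proved, stated in full; the proofs are below) =====
def Claim_equal_findPrizeList : Prop := ∀ (num_candies : Int), Dom_findPrizeList num_candies → Spec_findPrizeList num_candies (findPrizeList num_candies)

-- ===== LEMMAS AND PROOFS =====

-- triangular number, in the same form both ports compute it
def pvTri (k : Int) : Int := PySem.Int.floordiv (k * (k + 1)) 2

theorem pvTri_double (k : Int) : 2 * pvTri k = k * (k + 1) := by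
  obtain ⟨t, ht⟩ : (2 : Int) ∣ k * (k + 1) := (Int.even_mul_succ_self k).two_dvd
  unfold pvTri
  rw [ht, PySem.Int.floordiv_eq_ediv_of_pos (by omega)]
  omega

theorem pvTri_mono {a b : Int} (h0 : 0 ≤ a) (hab : a ≤ b) : pvTri a ≤ pvTri b := by
  have h2 : 2 * pvTri a = a * (a + 1) := pvTri_double a
  have h3 : 2 * pvTri b = b * (b + 1) := pvTri_double b
  nlinarith

theorem pvTri_succ (k : Int) : pvTri (k + 1) = pvTri k + (k + 1) := by
  have h2 := pvTri_double k
  have h3 := pvTri_double (k + 1)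
  nlinarith

-- uniqueness of the bracket Tri m ≤ n < Tri (m+1) among m ≥ 1
theorem pvTri_unique {m m' n : Int} (hm : 1 ≤ m) (hm' : 1 ≤ m')
    (h1 : pvTri m ≤ n) (h2 : n < pvTri (m + 1))
    (h3 : pvTri m' ≤ n) (h4 : n < pvTri (m' + 1)) : m = m' := by
  by_contra hne
  rcases lt_or_gt_of_ne hne with h | h
  · have := pvTri_mono (a := m + 1) (b := m') (by omega) (by omega); omega
  · have := pvTri_mono (a := m' + 1) (b := m) (by omega) (by omega); omega

-- range facts
theorem pvRange_snoc {k : Int} (hk : 1 ≤ k) :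
    PySem.List.pyRange 1 (k + 1) 1 = PySem.List.pyRange 1 k 1 ++ [k] := by
  have := PySem.List.pyRange_one_succ_right (a := 1) (b := k) (by omega)
  simpa using this

theorem pvRange_dropLast {k : Int} (hk : 1 ≤ k) :
    (PySem.List.pyRange 1 (k + 1) 1).dropLast = PySem.List.pyRange 1 k 1 := by
  rw [pvRange_snoc hk, List.dropLast_concat]

theorem pvRange_last {k : Int} (hk : 1 ≤ k) :
    PySem.List.pyGetD (PySem.List.pyRange 1 (k + 1) 1) (-1) 0 = k := by
  rw [pvRange_snoc hk, PySem.List.pyGetD_neg_one_append_singleton]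

-- closed form of A's loop
theorem pvLoopA_spec : ∀ (fuel : Nat) (k rem : Int), 2 ≤ k → 0 ≤ rem → rem.toNat ≤ fuel →
    ∃ m, 2 ≤ m ∧ pvTri m ≤ pvTri k + rem ∧ pvTri k + rem < pvTri (m + 1) ∧
      pvLoopA fuel (PySem.List.pyRange 1 (k + 1) 1) rem
        = PySem.List.pyRange 1 m 1 ++ [m + (pvTri k + rem - pvTri m)] := by
  intro fuel
  induction fuel with
  | zero =>
    intro k rem hk hrem hfuel
    have h0 : rem = 0 := by omega
    refine ⟨k, hk, by omega, by rw [pvTri_succ]; omega, ?_⟩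
    subst h0
    simp [pvLoopA, pvRange_snoc (by omega : (1:Int) ≤ k)]
  | succ fuel ih =>
    intro k rem hk hrem hfuel
    by_cases hpos : rem > 0
    · have hlast : PySem.List.pyGetD (PySem.List.pyRange 1 (k + 1) 1) (-1) 0 = k :=
        pvRange_last (by omega)
      by_cases hbig : rem ≥ k + 1
      · -- append k+1 and recurse
        obtain ⟨m, hm2, hml, hmr, heq⟩ :=
          ih (k + 1) (rem - (k + 1)) (by omega) (by omega) (by omega)
        refine ⟨m, hm2, ?_, ?_, ?_⟩
        · rw [pvTri_succ] at hml; omega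
        · rw [pvTri_succ (k := k)] at hmr; omega
        · have : pvTri (k + 1) + (rem - (k + 1)) = pvTri k + rem := by
            rw [pvTri_succ]; ring
          rw [this] at heq
          simp only [pvLoopA, if_pos hpos, hlast, if_pos hbig]
          rw [← heq]
          congr 1
          rw [pvRange_snoc (k := k + 1) (by omega)]
      · -- add the remainder to the last prize; the loop then exits (rem = 0)
        refine ⟨k, hk, by omega, by rw [pvTri_succ]; omega, ?_⟩
        simp only [pvLoopA, if_pos hpos, hlast, if_neg hbig]
        rw [pvRange_dropLast (by omega)]
        cases fuel with
        | zero => simp [pvLoopA]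
        | succ f => simp [pvLoopA]
    · have h0 : rem = 0 := by omega
      refine ⟨k, hk, by omega, by rw [pvTri_succ]; omega, ?_⟩
      subst h0
      simp [pvLoopA, pvRange_snoc (by omega : (1:Int) ≤ k)]

-- the binary search lands in the bracket
theorem pvBSearch_spec : ∀ (fuel : Nat) (lo hi n : Int), 1 ≤ lo → lo ≤ hi →
    pvTri lo ≤ n → n < pvTri (hi + 1) → (hi - lo).toNat ≤ fuel →
    1 ≤ pvBSearch fuel lo hi n ∧ pvTri (pvBSearch fuel lo hi n) ≤ n ∧
      n < pvTri (pvBSearch fuel lo hi n + 1) := by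
  intro fuel
  induction fuel with
  | zero =>
    intro lo hi n h1 h2 h3 h4 hf
    have heq : lo = hi := by omega
    simp only [pvBSearch]
    rw [← heq] at h4
    exact ⟨h1, h3, h4⟩
  | succ fuel ih =>
    intro lo hi n h1 h2 h3 h4 hf
    by_cases hlt : lo < hi
    · have hmid : lo + 1 ≤ PySem.Int.floordiv (lo + hi + 1) 2 ∧
          PySem.Int.floordiv (lo + hi + 1) 2 ≤ hi := by
        rw [PySem.Int.floordiv_eq_ediv_of_pos (by omega)]
        omega
      simp only [pvBSearch, if_pos hlt]
      set mid := PySem.Int.floordiv (lo + hi + 1) 2 with hmiddef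
      by_cases hle : PySem.Int.floordiv (mid * (mid + 1)) 2 ≤ n
      · rw [if_pos hle]
        exact ih mid hi n (by omega) (by omega) hle h4 (by omega)
      · rw [if_neg hle]
        have : n < pvTri mid := by unfold pvTri; omega
        refine ih lo (mid - 1) n h1 (by omega) h3 ?_ (by omega)
        have : mid - 1 + 1 = mid := by ring
        rw [this]; exact ‹n < pvTri mid›
    · have heq : lo = hi := by omega
      simp only [pvBSearch, if_neg hlt]
      rw [← heq] at h4
      exact ⟨h1, h3, h4⟩

-- ===== VERDICT (by name: the statement is the Claim_ definition above) =====
theorem findPrizeList_spec : Claim_equal_findPrizeList := by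
  intro n _
  unfold Spec_findPrizeList findPrizeList findPrizeList_alt
  by_cases hlt : n < 3
  · simp [hlt]
  · simp only [if_neg hlt]
    have hn3 : 3 ≤ n := by omega
    -- A's side
    have h3 : pvTri 2 = 3 := by decide
    obtain ⟨mA, hA2, hAl, hAr, hAeq⟩ :=
      pvLoopA_spec n.toNat 2 (n - 3) (by omega) (by omega) (by omega)
    have hAn : pvTri 2 + (n - 3) = n := by rw [h3]; ring
    rw [hAn] at hAl hAr hAeq
    have hlists : ([1, 2] : List Int) = PySem.List.pyRange 1 (2 + 1) 1 := by decide
    rw [hlists, hAeq]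
    -- B's side
    have hT1 : pvTri 1 = 1 := by decide
    have hTn : n < pvTri (n + 1) := by
      have := pvTri_double (n + 1)
      nlinarith [hn3]
    obtain ⟨hB1, hBl, hBr⟩ :=
      pvBSearch_spec (n - 1).toNat 1 n n (by omega) (by omega) (by omega) hTn (by omega)
    set mB := pvBSearch (n - 1).toNat 1 n n with hmB
    have hmm : mA = mB := pvTri_unique (by omega) hB1 hAl hAr hBl hBr
    rw [pvRange_dropLast (by omega : (1:Int) ≤ mB), pvRange_last (by omega : (1:Int) ≤ mB)]
    rw [hmm]
    have : PySem.Int.floordiv (mB * (mB + 1)) 2 = pvTri mB := rfl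
    rw [this]
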